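-- pv_equiv track=rewrite | github.com/JiminiiiKim/Programmers | Python/[프로그래머스] 대충 만든 자판.py | solution
-- ===== SOURCE A (Python) =====
-- def solution(keymap, targets):
--     answer = [0] * len(targets)
--
--     for idx in range(len(targets)) :
--         for word in targets[idx] :
--             cnt = 0
--             # 모든 keymap에서 각 단어 확인
--             for key in keymap :
--                 if word in key :
--                     if cnt != 0 :
--                         if cnt >= key.index(word) + 1 :
--                             cnt = key.index(word) + 1
--                     else :
--                         cnt = key.index(word) + 1
--                 # 없으면 계속
--                 else :
--                     continue
--             # 없으면 -1
--             if cnt == 0 :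
--                 answer[idx] = -1
--             else :
--                 if answer[idx] != -1 :
--                     answer[idx] += cnt
--
--
--     return answer
-- ===== SOURCE B (Python) =====
-- def solution(keymap, targets):
--     # Precompute, once, the minimal (1-based) key position of every character
--     # over all keymaps; then each target is a simple sum of O(1) lookups.
--     best = {}
--     for key in keymap:
--         for i, ch in enumerate(key):
--             b = best.get(ch)
--             if b is None or i + 1 < b:
--                 best[ch] = i + 1
--     res = []
--     for t in targets:
--         total = 0
--         for ch in t:
--             v = best.get(ch)
--             if v is None:
--                 total = -1
--                 break
--             total += v
--         res.append(total)
--     return res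
-- ===== Notes on version B (the rewrite author's own statement) =====
-- stated objective: faster
-- what changed: Instead of rescanning every keymap string for every character of every target, B builds a char->minimal-position dict over the keymaps once and answers each target by summing O(1) lookups (with an early break on a missing char).
import Mathlib
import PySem

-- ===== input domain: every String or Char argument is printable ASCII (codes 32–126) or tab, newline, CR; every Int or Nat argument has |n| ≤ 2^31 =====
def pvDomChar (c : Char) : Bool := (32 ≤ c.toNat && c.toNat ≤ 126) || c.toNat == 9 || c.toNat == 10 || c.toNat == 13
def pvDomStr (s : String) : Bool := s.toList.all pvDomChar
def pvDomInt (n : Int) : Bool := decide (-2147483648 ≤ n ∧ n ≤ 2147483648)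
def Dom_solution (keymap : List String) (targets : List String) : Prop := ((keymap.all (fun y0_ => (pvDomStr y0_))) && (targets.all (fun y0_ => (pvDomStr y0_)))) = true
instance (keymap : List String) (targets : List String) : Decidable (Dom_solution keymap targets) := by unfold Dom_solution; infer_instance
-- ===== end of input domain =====

-- B replaces A's per-character rescan of every keymap by one precomputed
-- char -> minimal-position dict, then sums O(1) lookups per target (faster, asymptotic).

-- ===== PORT A =====
-- 'word' is a single character of the target, so Python's 'word in key' is char
-- membership and 'key.index(word)' is the first char index — ported exactly as such.
def pvCntStep (w : Char) (cnt : Int) (key : String) : Int :=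
  if key.toList.contains w then
    let j : Int := key.toList.idxOf w
    if cnt ≠ 0 then (if cnt ≥ j + 1 then j + 1 else cnt) else j + 1
  else cnt

-- the inner 'for key in keymap' loop computing cnt for one character
def pvCnt (keymap : List String) (w : Char) : Int := keymap.foldl (pvCntStep w) 0

-- one step of 'for word in targets[idx]': mutate answer[idx]
def pvWordStep (keymap : List String) (idx : Nat) (answer : List Int) (w : Char) : List Int :=
  let cnt := pvCnt keymap w
  if cnt = 0 then answer.set idx (-1)
  else if answer.getD idx 0 ≠ -1 then answer.set idx (answer.getD idx 0 + cnt)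
  else answer

def solution (keymap : List String) (targets : List String) : List Int :=
  (List.range targets.length).foldl
    (fun answer idx => ((targets.getD idx "").toList).foldl (pvWordStep keymap idx) answer)
    (List.replicate targets.length (0 : Int))

-- ===== PORT B =====
-- 'for i, ch in enumerate(key): update best' for one key
def pvBestStep (d : PySem.Dict Char Int) (p : Int × Char) : PySem.Dict Char Int :=
  match d.get? p.2 with
  | none => d.insert p.2 (p.1 + 1)
  | some b => if p.1 + 1 < b then d.insert p.2 (p.1 + 1) else d

def pvBestKey (d : PySem.Dict Char Int) (key : String) : PySem.Dict Char Int :=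
  (PySem.List.enumerate key.toList 0).foldl pvBestStep d

def pvBest (keymap : List String) : PySem.Dict Char Int :=
  keymap.foldl pvBestKey PySem.Dict.empty

-- 'for ch in t: … break' — early return on a missing character
def pvScore (best : PySem.Dict Char Int) : List Char → Int → Int
  | [], total => total
  | c :: rest, total =>
    match best.get? c with
    | none => -1
    | some v => pvScore best rest (total + v)

def solution_alt (keymap : List String) (targets : List String) : List Int :=
  targets.map (fun t => pvScore (pvBest keymap) t.toList 0)

-- ===== PRECONDITION & SPEC =====
def Spec_solution (keymap : List String) (targets : List String) (out : List Int) : Prop := out = solution_alt keymap targets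
instance (keymap : List String) (targets : List String) (out : List Int) : Decidable (Spec_solution keymap targets out) := by unfold Spec_solution; infer_instance

-- ===== CLAIM (what is proved, stated in full; the proofs are below) =====
def Claim_equal_solution : Prop := ∀ (keymap : List String) (targets : List String), Dom_solution keymap targets → Spec_solution keymap targets (solution keymap targets)

-- ===== LEMMAS AND PROOFS =====

-- cnt stays nonnegative through A's keymap scan
theorem pvCntStep_nonneg (w : Char) (cnt : Int) (key : String) (h : 0 ≤ cnt) :
    0 ≤ pvCntStep w cnt key := by
  unfold pvCntStep
  split_ifs <;> simp_all <;> omega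

theorem foldl_pvCntStep_nonneg (w : Char) (keys : List String) (s : Int) (h : 0 ≤ s) :
    0 ≤ keys.foldl (pvCntStep w) s := by
  induction keys generalizing s with
  | nil => simpa
  | cons k rest ih => exact ih _ (pvCntStep_nonneg w s k h)

theorem pvCnt_nonneg (keymap : List String) (w : Char) : 0 ≤ pvCnt keymap w :=
  foldl_pvCntStep_nonneg w keymap 0 le_rfl

-- the value one key of B's dict build leaves for character c
def pvKeyMerge (cs : List Char) (i : Int) (f : Char → Int) (c : Char) : Int :=
  if cs.contains c then
    (if f c = 0 then i + cs.idxOf c + 1 else min (f c) (i + cs.idxOf c + 1))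
  else f c

-- the per-character value after B processes ONE enumerated pair (i, x)
def pvUpd (x : Char) (i : Int) (f : Char → Int) : Char → Int :=
  fun c => if c = x then (if f x = 0 then i + 1 else min (f x) (i + 1)) else f c

theorem pvBestFold_get? (cs : List Char) : ∀ (i : Int), 0 ≤ i →
    ∀ (d : PySem.Dict Char Int) (f : Char → Int),
    (∀ c, 0 ≤ f c) → (∀ c, d.get? c = if f c = 0 then none else some (f c)) →
    ∀ c, ((PySem.List.enumerate cs i).foldl pvBestStep d).get? c
      = if pvKeyMerge cs i f c = 0 then none else some (pvKeyMerge cs i f c) := by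
  induction cs with
  | nil => intro i hi d f hf0 hfd c; simpa [pvKeyMerge, PySem.List.enumerate_nil] using hfd c
  | cons x rest ih =>
    intro i hi d f hf0 hfd c
    rw [PySem.List.enumerate_cons, List.foldl_cons]
    have hstep : ∀ c, (pvBestStep d (i, x)).get? c =
        if pvUpd x i f c = 0 then none else some (pvUpd x i f c) := by
      intro c
      show (match d.get? x with
            | none => d.insert x (i + 1)
            | some b => if i + 1 < b then d.insert x (i + 1) else d).get? c = _
      rw [hfd x]
      by_cases h0 : f x = 0
      · rw [if_pos h0]
        show (d.insert x (i + 1)).get? c = _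
        rw [PySem.Dict.get?_insert]
        by_cases hcx : c = x
        · subst hcx
          rw [if_pos rfl]
          simp only [pvUpd, if_true]
          rw [if_pos h0, if_neg (by omega : ¬ i + 1 = 0)]
        · rw [if_neg hcx]; simp only [pvUpd]; rw [if_neg hcx, hfd c]
      · rw [if_neg h0]
        show (if i + 1 < f x then d.insert x (i + 1) else d).get? c = _
        by_cases hlt : i + 1 < f x
        · rw [if_pos hlt, PySem.Dict.get?_insert]
          by_cases hcx : c = x
          · subst hcx
            rw [if_pos rfl]
            simp only [pvUpd, if_true]
            rw [if_neg h0, (by omega : min (f c) (i + 1) = i + 1),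
              if_neg (by omega : ¬ i + 1 = 0)]
          · rw [if_neg hcx]; simp only [pvUpd]; rw [if_neg hcx, hfd c]
        · rw [if_neg hlt]
          by_cases hcx : c = x
          · subst hcx
            rw [hfd c, if_neg h0]
            simp only [pvUpd, if_true]
            have hfx := hf0 c
            rw [if_neg h0, (by omega : min (f c) (i + 1) = f c), if_neg h0]
          · simp only [pvUpd]; rw [if_neg hcx, hfd c]
    have hupd0 : ∀ c, 0 ≤ pvUpd x i f c := by
      intro c
      have := hf0 c; have := hf0 x
      simp only [pvUpd]; split_ifs <;> omega
    rw [ih (i + 1) (by omega) (pvBestStep d (i, x)) (pvUpd x i f) hupd0 hstep c]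
    -- identify the merged value functions
    have hmerge : pvKeyMerge rest (i + 1) (pvUpd x i f) c = pvKeyMerge (x :: rest) i f c := by
      have hfc := hf0 c
      have hfx := hf0 x
      have hidx : (0:Int) ≤ (rest.idxOf c : Int) := Int.natCast_nonneg _
      by_cases hcx : c = x
      · subst hcx
        simp only [pvKeyMerge, pvUpd, if_true, List.contains_cons, BEq.rfl,
          Bool.true_or, List.idxOf_cons, cond_true, Nat.cast_zero]
        by_cases hm : rest.contains c = true
        · rw [if_pos hm]
          split_ifs <;> omega
        · rw [if_neg hm]
          split_ifs <;> omega
      · have hbne : (x == c) = false := beq_eq_false_iff_ne.mpr (fun h => hcx h.symm)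
        have hbne' : (c == x) = false := beq_eq_false_iff_ne.mpr hcx
        simp only [pvKeyMerge, pvUpd, if_neg hcx, List.contains_cons, hbne, hbne',
          Bool.false_or, List.idxOf_cons, cond_false]
        by_cases hm : rest.contains c = true
        · rw [if_pos hm, if_pos hm]
          split_ifs <;> push_cast <;> omega
        · rw [if_neg hm, if_neg hm]
    rw [hmerge]

-- one key of B's dict build, against A's one-key cnt step (pointwise)
theorem pvBestKey_get? (key : String) (d : PySem.Dict Char Int) (f : Char → Int)
    (hf0 : ∀ c, 0 ≤ f c)
    (hfd : ∀ c, d.get? c = if f c = 0 then none else some (f c)) (c : Char) :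
    (pvBestKey d key).get? c =
      if pvCntStep c (f c) key = 0 then none else some (pvCntStep c (f c) key) := by
  unfold pvBestKey
  rw [pvBestFold_get? key.toList 0 le_rfl d f hf0 hfd c]
  have : pvKeyMerge key.toList 0 f c = pvCntStep c (f c) key := by
    unfold pvKeyMerge pvCntStep
    dsimp only
    have : (0:Int) ≤ key.toList.idxOf c := Int.natCast_nonneg _
    have := hf0 c
    split_ifs <;> omega
  rw [this]

-- B's whole dict against A's whole cnt scan
theorem pvBest_aux (keys : List String) : ∀ (d : PySem.Dict Char Int) (f : Char → Int),
    (∀ c, 0 ≤ f c) → (∀ c, d.get? c = if f c = 0 then none else some (f c)) →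
    ∀ c, (keys.foldl pvBestKey d).get? c =
      if keys.foldl (pvCntStep c) (f c) = 0 then none
      else some (keys.foldl (pvCntStep c) (f c)) := by
  induction keys with
  | nil => intro d f _ hfd c; simpa using hfd c
  | cons k rest ih =>
    intro d f hf0 hfd c
    simp only [List.foldl_cons]
    exact ih (pvBestKey d k) (fun c => pvCntStep c (f c) k)
      (fun c => pvCntStep_nonneg c (f c) k (hf0 c))
      (fun c => pvBestKey_get? k d f hf0 hfd c) c

theorem pvBest_get? (keymap : List String) (c : Char) :
    (pvBest keymap).get? c = if pvCnt keymap c = 0 then none else some (pvCnt keymap c) := by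
  simpa [pvBest, pvCnt] using
    pvBest_aux keymap PySem.Dict.empty (fun _ => 0) (fun _ => le_rfl)
      (fun c => by simp) c

-- A's per-character accumulator step on answer[idx]
def pvAStep (keymap : List String) (s : Int) (w : Char) : Int :=
  let cnt := pvCnt keymap w
  if cnt = 0 then -1 else if s ≠ -1 then s + cnt else s

theorem foldl_pvAStep_neg_one (keymap : List String) (cs : List Char) :
    cs.foldl (pvAStep keymap) (-1) = -1 := by
  induction cs with
  | nil => rfl
  | cons w rest ih =>
    rw [List.foldl_cons,
      show pvAStep keymap (-1) w = -1 by
        unfold pvAStep; dsimp only; split_ifs <;> simp_all]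
    exact ih

theorem foldl_pvAStep_eq_pvScore (keymap : List String) (cs : List Char) (s : Int)
    (hs : 0 ≤ s) : cs.foldl (pvAStep keymap) s = pvScore (pvBest keymap) cs s := by
  induction cs generalizing s with
  | nil => rfl
  | cons c rest ih =>
    rw [List.foldl_cons]
    by_cases h0 : pvCnt keymap c = 0
    · rw [show pvAStep keymap s c = -1 by unfold pvAStep; dsimp only; rw [if_pos h0],
        foldl_pvAStep_neg_one]
      rw [show pvScore (pvBest keymap) (c :: rest) s = -1 by
        unfold pvScore; rw [pvBest_get? keymap c, if_pos h0]]
    · have hpos : 0 < pvCnt keymap c := lt_of_le_of_ne (pvCnt_nonneg _ _) (Ne.symm h0)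
      rw [show pvAStep keymap s c = s + pvCnt keymap c by
        unfold pvAStep; dsimp only; rw [if_neg h0, if_pos (by omega : s ≠ -1)]]
      rw [ih _ (by omega)]
      conv_rhs => rw [show pvScore (pvBest keymap) (c :: rest) s
        = pvScore (pvBest keymap) rest (s + pvCnt keymap c) by
          unfold pvScore; rw [pvBest_get? keymap c, if_neg h0]; cases rest <;> rfl]

-- the inner word loop only rewrites answer[idx]
theorem wordloop_eq_set (keymap : List String) (idx : Nat) (cs : List Char)
    (answer : List Int) (h : idx < answer.length) :
    cs.foldl (pvWordStep keymap idx) answer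
      = answer.set idx (cs.foldl (pvAStep keymap) (answer.getD idx 0)) := by
  induction cs generalizing answer with
  | nil =>
    simp only [List.foldl_nil]
    apply List.ext_getElem (by simp)
    intro i h1 h2
    by_cases hix : i = idx
    · subst hix; simp [List.getD, h]
    · simp [Ne.symm hix]
  | cons w rest ih =>
    rw [List.foldl_cons, List.foldl_cons]
    by_cases h0 : pvCnt keymap w = 0
    · rw [show pvWordStep keymap idx answer w = answer.set idx (-1) by
        unfold pvWordStep; dsimp only; rw [if_pos h0]]
      rw [ih _ (by simpa using h)]
      rw [show (answer.set idx (-1)).getD idx 0 = -1 by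
        simp [List.getD, h], List.set_set]
      congr 2
      unfold pvAStep; dsimp only; rw [if_pos h0]
    · by_cases hne : answer.getD idx 0 ≠ -1
      · rw [show pvWordStep keymap idx answer w
            = answer.set idx (answer.getD idx 0 + pvCnt keymap w) by
          unfold pvWordStep; dsimp only; rw [if_neg h0, if_pos hne]]
        rw [ih _ (by simpa using h)]
        rw [show (answer.set idx (answer.getD idx 0 + pvCnt keymap w)).getD idx 0
            = answer.getD idx 0 + pvCnt keymap w by
          simp [List.getD, h], List.set_set]
        congr 2
        unfold pvAStep; dsimp only; rw [if_neg h0, if_pos hne]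
      · rw [show pvWordStep keymap idx answer w = answer by
          unfold pvWordStep; dsimp only; rw [if_neg h0, if_neg hne]]
        rw [ih _ h]
        congr 2
        unfold pvAStep; dsimp only; rw [if_neg h0, if_neg hne]

-- the outer loop fills answer position by position
theorem outer_loop (keymap : List String) (targets : List String) (n : Nat)
    (hn : n ≤ targets.length) :
    (List.range n).foldl
        (fun answer idx => ((targets.getD idx "").toList).foldl (pvWordStep keymap idx) answer)
        (List.replicate targets.length (0 : Int))
      = (List.range n).map
          (fun idx => pvScore (pvBest keymap) (targets.getD idx "").toList 0)
        ++ List.replicate (targets.length - n) 0 := by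
  induction n with
  | zero => simp
  | succ m ih =>
    have hm : m < targets.length := by omega
    rw [List.range_succ, List.foldl_append, List.foldl_cons, List.foldl_nil, ih (by omega)]
    set g := fun idx => pvScore (pvBest keymap) (targets.getD idx "").toList 0 with hg
    set ans := (List.range m).map g ++ List.replicate (targets.length - m) (0 : Int) with hans
    have hlen : ans.length = targets.length := by simp [hans]; omega
    have hmap : ((List.range m).map g).length = m := by simp
    have hgd : ans.getD m 0 = 0 := by
      simp only [hans, List.getD, List.getElem?_append_right (by simp : m ≥ ((List.range m).map g).length), hmap]
      simp [hm]
    rw [wordloop_eq_set keymap m _ ans (by omega), hgd,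
      foldl_pvAStep_eq_pvScore keymap _ 0 le_rfl]
    rw [List.map_append, List.map_cons, List.map_nil]
    rw [show targets.length - m = (targets.length - (m + 1)) + 1 by omega,
      List.replicate_succ] at hans
    rw [hans, List.set_append_right _ _ (by simp), hmap, Nat.sub_self, List.set_cons_zero,
      List.append_assoc, List.singleton_append]

theorem solution_spec : Claim_equal_solution := by
  intro keymap targets _
  unfold Spec_solution solution solution_alt
  rw [outer_loop keymap targets targets.length le_rfl, Nat.sub_self, List.replicate_zero,
    List.append_nil]
  apply List.ext_getElem (by simp)
  intro i h1 h2
  have h3 : i < targets.length := by simpa using h2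
  simp [List.getD, List.getElem?_eq_getElem h3]
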